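-- pv_equiv track=rewrite | github.com/Seekersdk/HA-SolarFriend | custom_components/solarfriend/forecast_correction_model.py | _geometry_key_from_legacy_key
-- ===== SOURCE A (Python) =====
-- from typing import Any
--
-- def _geometry_key_from_legacy_key(key: Any) -> str:
--     parts = str(key).split("|")
--     season = next((part[1:] for part in parts if part.startswith("s")), None)
--     elevation = next((part[1:] for part in parts if part.startswith("e")), None)
--     azimuth = next((part[1:] for part in parts if part.startswith("a")), None)
--     if None in (season, elevation, azimuth):
--         return ""
--     return f"s{season}|e{elevation}|a{azimuth}"
-- ===== SOURCE B (Python) =====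
-- def _geometry_key_from_legacy_key(key) -> str:
--     d = {}
--     for part in str(key).split("|"):
--         c = part[:1]
--         if c and c in "sea" and c not in d:
--             d[c] = part[1:]
--     season, elevation, azimuth = d.get("s"), d.get("e"), d.get("a")
--     if season is None or elevation is None or azimuth is None:
--         return ""
--     return f"s{season}|e{elevation}|a{azimuth}"
-- ===== Notes on version B (the rewrite author's own statement) =====
-- stated objective: simpler
-- what changed: Replaces A's three separate scans of the parts list (one next(...) generator per prefix) with a single pass that builds a first-occurrence dict keyed by the leading character.
import Mathlib
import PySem

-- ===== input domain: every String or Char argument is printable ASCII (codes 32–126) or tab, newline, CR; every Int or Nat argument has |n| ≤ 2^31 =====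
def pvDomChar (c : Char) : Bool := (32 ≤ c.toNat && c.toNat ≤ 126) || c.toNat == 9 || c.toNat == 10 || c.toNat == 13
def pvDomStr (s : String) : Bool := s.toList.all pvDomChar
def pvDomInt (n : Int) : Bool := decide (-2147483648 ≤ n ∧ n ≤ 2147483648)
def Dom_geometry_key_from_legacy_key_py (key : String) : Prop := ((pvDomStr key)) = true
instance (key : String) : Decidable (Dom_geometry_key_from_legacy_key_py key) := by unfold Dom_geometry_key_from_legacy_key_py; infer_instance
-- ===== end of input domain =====

-- B replaces A's three separate scans of the parts list with one pass building a
-- first-occurrence dict keyed by each part's leading character (objective: simpler).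

-- ===== PORT A =====
def geometry_key_from_legacy_key_py (key : String) : String :=
  let parts := (PySem.Str.split? key "|").getD []
  let season := (parts.find? (fun p => PySem.Str.startswith p "s")).map
      (fun p => PySem.Str.slice p (some 1) none)
  let elevation := (parts.find? (fun p => PySem.Str.startswith p "e")).map
      (fun p => PySem.Str.slice p (some 1) none)
  let azimuth := (parts.find? (fun p => PySem.Str.startswith p "a")).map
      (fun p => PySem.Str.slice p (some 1) none)
  match season, elevation, azimuth with
  | some s, some e, some a => "s" ++ s ++ "|e" ++ e ++ "|a" ++ a
  | _, _, _ => ""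

-- ===== PORT B =====
def pvStepB (d : PySem.Dict String String) (part : String) : PySem.Dict String String :=
  let c := PySem.Str.slice part none (some 1)
  if c ≠ "" ∧ PySem.Str.isIn c "sea" = true ∧ d.contains c = false then
    d.insert c (PySem.Str.slice part (some 1) none)
  else d

def geometry_key_from_legacy_key_py_alt (key : String) : String :=
  let d := ((PySem.Str.split? key "|").getD []).foldl pvStepB PySem.Dict.empty
  match d.get? "s" with
  | none => ""
  | some season =>
    match d.get? "e" with
    | none => ""
    | some elevation =>
      match d.get? "a" with
      | none => ""
      | some azimuth => "s" ++ season ++ "|e" ++ elevation ++ "|a" ++ azimuth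

-- ===== PRECONDITION & SPEC =====
def Spec_geometry_key_from_legacy_key_py (key : String) (out : String) : Prop := out = geometry_key_from_legacy_key_py_alt key
instance (key : String) (out : String) : Decidable (Spec_geometry_key_from_legacy_key_py key out) := by unfold Spec_geometry_key_from_legacy_key_py; infer_instance

-- ===== CLAIM (what is proved, stated in full; the proofs are below) =====
def Claim_equal_geometry_key_from_legacy_key_py : Prop := ∀ (key : String), Dom_geometry_key_from_legacy_key_py key → Spec_geometry_key_from_legacy_key_py key (geometry_key_from_legacy_key_py key)

-- ===== LEMMAS AND PROOFS =====

theorem pvTake1_eq_of_startswith {p c : String} (hlen : c.toList.length = 1)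
    (h : PySem.Str.startswith p c = true) :
    PySem.Str.slice p none (some 1) = c := by
  apply String.toList_inj.mp
  simp [PySem.Chars.startswith_iff] at h
  obtain ⟨t, ht⟩ := h
  obtain ⟨x, hx⟩ : ∃ x, c.toList = [x] := by
    match hc : c.toList with
    | [x] => exact ⟨x, rfl⟩
    | [] | _::_::_ => simp [hc] at hlen
  have h1 := PySem.List.slice_to (xs := p.toList) (b := (1:Int)) (by norm_num)
  rw [PySem.Str.toList_slice, PySem.Chars.slice_eq_listSlice, h1, ← ht, hx]
  simp

theorem pvStartswith_of_take1 {p c : String}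
    (h : PySem.Str.slice p none (some 1) = c) :
    PySem.Str.startswith p c = true := by
  simp [PySem.Chars.startswith_iff]
  rw [← h]
  have h1 := PySem.List.slice_to (xs := p.toList) (b := (1:Int)) (by norm_num)
  rw [PySem.Str.toList_slice, PySem.Chars.slice_eq_listSlice, h1]
  exact List.take_prefix _ _

theorem pvFold_get? (c : String) (hlen : c.toList.length = 1)
    (hin : PySem.Str.isIn c "sea" = true) :
    ∀ (parts : List String) (d : PySem.Dict String String),
      (List.foldl pvStepB d parts).get? c =
        (d.get? c).or
          ((parts.find? (fun p => PySem.Str.startswith p c)).map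
            (fun p => PySem.Str.slice p (some 1) none)) := by
  intro parts
  induction parts with
  | nil => intro d; simp
  | cons p rest ih =>
    intro d
    have hcne : c ≠ "" := by
      intro h; rw [h] at hlen; simp at hlen
    have hin' : PySem.Chars.isIn c.toList ['s', 'e', 'a'] = true := by
      have := hin; simp at this; exact this
    rw [List.foldl_cons, ih]
    by_cases hsw : PySem.Str.startswith p c = true
    · have hpc : PySem.Str.slice p none (some 1) = c := pvTake1_eq_of_startswith hlen hsw
      have hf : List.find? (fun q => PySem.Str.startswith q c) (p :: rest) = some p := by
        have hsw' := hsw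
        rw [PySem.Str.startswith_eq] at hsw'
        simp [hsw']
      rw [hf]
      by_cases hcon : PySem.Dict.contains d c = false
      · have hd : pvStepB d p = d.insert c (PySem.Str.slice p (some 1) none) := by
          dsimp only [pvStepB]; rw [hpc]; simp [hcne, hin', hcon]
        have hdnone : d.get? c = none := by
          rw [PySem.Dict.contains_eq_isSome_get?] at hcon
          cases hg : PySem.Dict.get? d c with
          | none => rfl
          | some v => rw [hg] at hcon; simp at hcon
        rw [hd, PySem.Dict.get?_insert_self, hdnone]
        simp [Option.or]
      · have hd : pvStepB d p = d := by
          dsimp only [pvStepB]; rw [hpc]; simp [hcon]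
        rw [Bool.not_eq_false, PySem.Dict.contains_eq_isSome_get?] at hcon
        obtain ⟨v, hv⟩ := Option.isSome_iff_exists.mp hcon
        rw [hd, hv]
        simp [Option.or]
    · have hf : List.find? (fun q => PySem.Str.startswith q c) (p :: rest) =
          List.find? (fun q => PySem.Str.startswith q c) rest := by
        have hsw' := hsw
        rw [PySem.Str.startswith_eq] at hsw'
        simp [hsw']
      rw [hf]
      have hget : (pvStepB d p).get? c = d.get? c := by
        dsimp only [pvStepB]
        split_ifs with hcond
        · apply PySem.Dict.get?_insert_of_ne
          intro heq
          have := pvStartswith_of_take1 heq.symm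
          simp at this
          simp [this] at hsw
        · rfl
      rw [hget]

-- ===== VERDICT (by name: the statement is the Claim_ definition above) =====
theorem geometry_key_from_legacy_key_py_spec : Claim_equal_geometry_key_from_legacy_key_py := by
  intro key _
  unfold Spec_geometry_key_from_legacy_key_py geometry_key_from_legacy_key_py geometry_key_from_legacy_key_py_alt
  dsimp only
  rw [pvFold_get? "s" (by decide) (by decide), pvFold_get? "e" (by decide) (by decide),
      pvFold_get? "a" (by decide) (by decide)]
  simp only [PySem.Dict.get?_empty, Option.or]
  cases (((PySem.Str.split? key "|").getD []).find? (fun p => PySem.Str.startswith p "s")) <;>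
    cases (((PySem.Str.split? key "|").getD []).find? (fun p => PySem.Str.startswith p "e")) <;>
      cases (((PySem.Str.split? key "|").getD []).find? (fun p => PySem.Str.startswith p "a")) <;>
        rfl
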